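-- pv_equiv track=rewrite | github.com/Igorok/algorithms-js | leetcode/medium/2536_rangeAddQueries.py | rangeAddQueries
-- ===== SOURCE A (Python) =====
-- from typing import List
--
-- def rangeAddQueries(n: int, queries: List[List[int]]) -> List[List[int]]:
--     n1 = n+1
--     grid = [[0]*n1 for i in range(n1)]
--
--     for r1, c1, r2, c2 in queries:
--         grid[r1][c1] += 1
--         grid[r1][c2+1] -= 1
--         grid[r2+1][c1] -= 1
--         grid[r2+1][c2+1] += 1
--
--     res = [[0]*n for i in range(n)]
--     for r in range(n):
--         for c in range(n):
--             top = 0 if r == 0 else res[r-1][c]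
--             left = 0 if c == 0 else res[r][c-1]
--             diag = 0 if r == 0 or c == 0 else res[r-1][c-1]
--             res[r][c] += grid[r][c] + top + left - diag
--
--     return res
-- ===== SOURCE B (Python) =====
-- from typing import List
--
-- def rangeAddQueries(n: int, queries: List[List[int]]) -> List[List[int]]:
--     res = [[0] * n for _ in range(n)]
--     for r1, c1, r2, c2 in queries:
--         for r in range(r1, r2 + 1):
--             for c in range(c1, c2 + 1):
--                 res[r][c] += 1
--     return res
-- ===== Notes on version B (the rewrite author's own statement) =====
-- stated objective: simpler
-- what changed: Replaces the (n+1)x(n+1) 2D difference array plus inclusion-exclusion prefix-sum sweep by directly incrementing every cell of each query's rectangle in an nxn grid.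
-- outside the precondition, e.g. on rangeAddQueries(2, [[-1, -1, -1, -1]]): A returns [[1, 1], [1, 1]], B returns [[0, 0], [0, 1]]; on rangeAddQueries(2, [[2, 0, 0, 0]]): A returns [[0, 0], [-1, 0]], B returns [[0, 0], [0, 0]]
import Mathlib
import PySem

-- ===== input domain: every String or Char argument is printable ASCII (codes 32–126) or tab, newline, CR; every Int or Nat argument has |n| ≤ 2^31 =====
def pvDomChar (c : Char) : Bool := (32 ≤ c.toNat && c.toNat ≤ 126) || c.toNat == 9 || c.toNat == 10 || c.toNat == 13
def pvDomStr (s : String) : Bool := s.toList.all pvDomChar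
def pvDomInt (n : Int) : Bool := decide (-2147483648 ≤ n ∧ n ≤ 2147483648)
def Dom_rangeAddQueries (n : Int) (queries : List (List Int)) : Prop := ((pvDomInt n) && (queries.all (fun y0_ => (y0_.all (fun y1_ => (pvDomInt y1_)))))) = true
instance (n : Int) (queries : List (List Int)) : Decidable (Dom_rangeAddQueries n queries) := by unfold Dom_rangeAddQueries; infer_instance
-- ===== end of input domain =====

-- B replaces A's (n+1)×(n+1) difference array + prefix-sum sweep by directly
-- incrementing every cell of each query's rectangle (simpler, not faster).

-- ===== PORT A =====

-- x[r][c] += v  (Python list assignment through both indices; negative wrap, out of range = no-op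
-- where Python raises IndexError — such inputs are outside Pre_)
def bump (m : List (List Int)) (r c v : Int) : List (List Int) :=
  let row := PySem.List.pyGetD m r []
  PySem.List.pySetD m r (PySem.List.pySetD row c (PySem.List.pyGetD row c 0 + v))

-- the body of A's first loop: the four difference-array updates for one query
def stepA (g : List (List Int)) (q : List Int) : List (List Int) :=
  match q with
  | [r1, c1, r2, c2] =>
      bump (bump (bump (bump g r1 c1 1) r1 (c2+1) (-1)) (r2+1) c1 (-1)) (r2+1) (c2+1) 1
  | _ => g   -- Python raises ValueError on wrong arity; outside Pre_

-- the body of A's second loop: one row of res, built cell by cell (left = cells built so far)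
def rowA (grid res : List (List Int)) (n r : Int) : List Int :=
  (PySem.List.pyRange 0 n 1).foldl (fun row c =>
    let top := if r = 0 then 0 else PySem.List.pyGetD (PySem.List.pyGetD res (r-1) []) c 0
    let left := if c = 0 then 0 else PySem.List.pyGetD row (c-1) 0
    let diag := if r = 0 ∨ c = 0 then 0 else PySem.List.pyGetD (PySem.List.pyGetD res (r-1) []) (c-1) 0
    row ++ [PySem.List.pyGetD (PySem.List.pyGetD grid r []) c 0 + top + left - diag]) []

def rangeAddQueries (n : Int) (queries : List (List Int)) : List (List Int) :=
  let n1 := n + 1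
  let grid := queries.foldl stepA (List.replicate n1.toNat (List.replicate n1.toNat (0:Int)))
  (PySem.List.pyRange 0 n 1).foldl (fun res r => res ++ [rowA grid res n r]) []

-- ===== PORT B =====

-- the body of B's loop: increment every cell of the query's rectangle
def stepB (res : List (List Int)) (q : List Int) : List (List Int) :=
  match q with
  | [r1, c1, r2, c2] =>
      (PySem.List.pyRange r1 (r2+1) 1).foldl (fun acc r =>
        (PySem.List.pyRange c1 (c2+1) 1).foldl (fun acc2 c => bump acc2 r c 1) acc) res
  | _ => res   -- Python raises ValueError on wrong arity; outside Pre_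

def rangeAddQueries_alt (n : Int) (queries : List (List Int)) : List (List Int) :=
  queries.foldl stepB (List.replicate n.toNat (List.replicate n.toNat (0:Int)))

-- ===== PRECONDITION & SPEC =====
-- Pre_ restricts to the problem's natural domain (each query is [r1,c1,r2,c2] with
-- 0 ≤ r1 ≤ r2 < n and 0 ≤ c1 ≤ c2 < n): outside it A raises ValueError/IndexError or
-- returns artefacts of negative-index wraparound / of its oversized (n+1)-grid on
-- inverted or out-of-range rectangles.
def Pre_rangeAddQueries (n : Int) (queries : List (List Int)) : Prop :=
  ∀ q ∈ queries, q.length = 4 ∧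
    0 ≤ q.getD 0 0 ∧ q.getD 0 0 ≤ q.getD 2 0 ∧ q.getD 2 0 < n ∧
    0 ≤ q.getD 1 0 ∧ q.getD 1 0 ≤ q.getD 3 0 ∧ q.getD 3 0 < n
instance (n : Int) (queries : List (List Int)) : Decidable (Pre_rangeAddQueries n queries) := by
  unfold Pre_rangeAddQueries; infer_instance

def pvWitness_rangeAddQueries : Int × List (List Int) := (3, [[0,0,1,1],[1,1,2,2]])

def Spec_rangeAddQueries (n : Int) (queries : List (List Int)) (out : List (List Int)) : Prop := out = rangeAddQueries_alt n queries
instance (n : Int) (queries : List (List Int)) (out : List (List Int)) : Decidable (Spec_rangeAddQueries n queries out) := by unfold Spec_rangeAddQueries; infer_instance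

-- ===== CLAIM (what is proved, stated in full; the proofs are below) =====
def Claim_equal_rangeAddQueries : Prop := ∀ (n : Int) (queries : List (List Int)), Dom_rangeAddQueries n queries → Pre_rangeAddQueries n queries → Spec_rangeAddQueries n queries (rangeAddQueries n queries)

-- ===== LEMMAS AND PROOFS =====

-- matrix entry (Nat indices, default 0)
def g2 (m : List (List Int)) (i j : Nat) : Int := (m.getD i []).getD j 0

-- 0/1 indicator: query q covers cell (r, c)
def covInd (q : List Int) (r c : Int) : Int :=
  match q with
  | [r1, c1, r2, c2] => if r1 ≤ r ∧ r ≤ r2 ∧ c1 ≤ c ∧ c ≤ c2 then 1 else 0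
  | _ => 0

-- the four-corner difference-array delta of query q at (r, c)
def dInd (q : List Int) (r c : Int) : Int :=
  match q with
  | [r1, c1, r2, c2] =>
      (if r = r1 ∧ c = c1 then 1 else 0) - (if r = r1 ∧ c = c2+1 then 1 else 0)
      - (if r = r2+1 ∧ c = c1 then 1 else 0) + (if r = r2+1 ∧ c = c2+1 then 1 else 0)
  | _ => 0

def cnt (qs : List (List Int)) (r c : Int) : Int := (qs.map (fun q => covInd q r c)).sum
def dsum (qs : List (List Int)) (r c : Int) : Int := (qs.map (fun q => dInd q r c)).sum

lemma len4 {q : List Int} (h : q.length = 4) : ∃ a b c d : Int, q = [a, b, c, d] := by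
  match q, h with
  | [a, b, c, d], _ => exact ⟨a, b, c, d, rfl⟩

lemma length_bump (m : List (List Int)) (r c v : Int) : (bump m r c v).length = m.length := by
  simp [bump, PySem.List.length_pySetD]

lemma rows_bump {m : List (List Int)} {w : Nat} (hrows : ∀ row ∈ m, row.length = w)
    {r c : Int} (hr : 0 ≤ r) (hrN : r < (m.length : Int)) (v : Int) :
    ∀ row ∈ bump m r c v, row.length = w := by
  have hRlt : r.toNat < m.length := by omega
  have hrowlen : m[r.toNat].length = w := hrows _ (List.getElem_mem hRlt)
  intro row hmem
  rw [bump, PySem.List.pySetD_of_nonneg _ _ hr,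
      PySem.List.pyGetD_eq_getElem _ _ hr hrN] at hmem
  rcases List.mem_or_eq_of_mem_set hmem with h | h
  · exact hrows _ h
  · subst h
    by_cases hc : 0 ≤ c
    · rw [PySem.List.pySetD_of_nonneg _ _ hc]
      simp [hrowlen]
    · -- negative c: pySetD either wraps (length preserved) or no-ops
      have : (PySem.List.pySetD m[r.toNat] c (PySem.List.pyGetD m[r.toNat] c 0 + v)).length
           = m[r.toNat].length := PySem.List.length_pySetD ..
      omega

lemma g2_bump {m : List (List Int)} {w : Nat}
    (hrows : ∀ row ∈ m, row.length = w)
    {r c : Int} (hr : 0 ≤ r) (hrN : r < (m.length : Int)) (hc : 0 ≤ c) (hcW : c < (w : Int))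
    (v : Int) (i j : Nat) (hi : i < m.length) (hj : j < w) :
    g2 (bump m r c v) i j = g2 m i j + (if (i : Int) = r ∧ (j : Int) = c then v else 0) := by
  have hRlt : r.toNat < m.length := by omega
  rw [bump, PySem.List.pySetD_of_nonneg _ _ hr, PySem.List.pySetD_of_nonneg _ _ hc,
      PySem.List.pyGetD_eq_getElem m [] hr hrN]
  obtain ⟨row, hrow⟩ : ∃ row, m[r.toNat] = row := ⟨_, rfl⟩
  rw [hrow]
  have hrowlen : row.length = w := hrow ▸ hrows _ (List.getElem_mem hRlt)
  rw [PySem.List.pyGetD_eq_getElem row 0 hc (by omega)]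
  unfold g2
  have hset : (m.set r.toNat (row.set c.toNat (row[c.toNat] + v))).getD i []
      = if r.toNat = i then row.set c.toNat (row[c.toNat] + v) else m.getD i [] := by
    rw [List.getD_eq_getElem _ _ (by simpa using hi), List.getElem_set,
        List.getD_eq_getElem _ _ hi]
  rw [hset]
  by_cases hir : r.toNat = i
  · rw [if_pos hir]
    have hmrow : m.getD i [] = row := by
      rw [List.getD_eq_getElem _ _ hi]
      subst hir
      exact hrow
    rw [hmrow]
    have h2 : (row.set c.toNat (row[c.toNat] + v)).getD j 0
        = if c.toNat = j then row[c.toNat] + v else row.getD j 0 := by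
      rw [List.getD_eq_getElem _ _ (by simp [hrowlen]; omega), List.getElem_set,
          List.getD_eq_getElem _ _ (by omega)]
    rw [h2]
    by_cases hjc : c.toNat = j
    · rw [if_pos hjc, if_pos (show (↑i : Int) = r ∧ (↑j : Int) = c by omega)]
      subst hjc
      rw [List.getD_eq_getElem _ _ (by omega)]
    · rw [if_neg hjc, if_neg (show ¬ ((↑i : Int) = r ∧ (↑j : Int) = c) by omega)]
      ring
  · rw [if_neg hir, if_neg (show ¬ ((↑i : Int) = r ∧ (↑j : Int) = c) by omega)]
    ring

-- one run of B's inner column loop over range [a, b)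
lemma colFold {w : Nat} {r : Int} (hr : 0 ≤ r) :
    ∀ (k : Nat) (a b : Int) (m : List (List Int)), (b - a).toNat = k →
    (∀ row ∈ m, row.length = w) → r < (m.length : Int) → 0 ≤ a → b ≤ (w : Int) →
    (((PySem.List.pyRange a b 1).foldl (fun acc c => bump acc r c 1) m).length = m.length
     ∧ (∀ row ∈ (PySem.List.pyRange a b 1).foldl (fun acc c => bump acc r c 1) m, row.length = w)
     ∧ ∀ i j : Nat, i < m.length → j < w →
        g2 ((PySem.List.pyRange a b 1).foldl (fun acc c => bump acc r c 1) m) i j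
          = g2 m i j + (if (i : Int) = r ∧ a ≤ (j : Int) ∧ (j : Int) < b then 1 else 0)) := by
  intro k
  induction k with
  | zero =>
    intro a b m hk hrows hrN ha hb
    rw [PySem.List.pyRange_one_eq_nil (by omega)]
    refine ⟨rfl, hrows, fun i j hi hj => ?_⟩
    rw [if_neg (by omega)]; simp [List.foldl_nil]
  | succ k ih =>
    intro a b m hk hrows hrN ha hb
    have hab : a < b := by omega
    rw [PySem.List.pyRange_one_cons hab, List.foldl_cons]
    have hlen : (bump m r a 1).length = m.length := length_bump ..
    have hrows' : ∀ row ∈ bump m r a 1, row.length = w := rows_bump (c := a) hrows hr hrN 1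
    obtain ⟨l1, l2, l3⟩ := ih (a+1) b (bump m r a 1) (by omega) hrows' (by omega) (by omega) hb
    refine ⟨by omega, l2, fun i j hi hj => ?_⟩
    rw [l3 i j (by omega) hj, g2_bump hrows hr hrN ha (by omega) 1 i j hi hj]
    split_ifs <;> omega

-- one run of B's rectangle (both nested loops) for bounds r-range [a, b), c-range [c1, c2+1)
lemma rowFold {w : Nat} {c1 c2 : Int} (hc1 : 0 ≤ c1) (hc2 : c2 + 1 ≤ (w : Int)) :
    ∀ (k : Nat) (a b : Int) (m : List (List Int)), (b - a).toNat = k →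
    (∀ row ∈ m, row.length = w) → 0 ≤ a → b ≤ (m.length : Int) →
    (((PySem.List.pyRange a b 1).foldl (fun acc r =>
        (PySem.List.pyRange c1 (c2+1) 1).foldl (fun acc2 c => bump acc2 r c 1) acc) m).length = m.length
     ∧ (∀ row ∈ (PySem.List.pyRange a b 1).foldl (fun acc r =>
        (PySem.List.pyRange c1 (c2+1) 1).foldl (fun acc2 c => bump acc2 r c 1) acc) m, row.length = w)
     ∧ ∀ i j : Nat, i < m.length → j < w →
        g2 ((PySem.List.pyRange a b 1).foldl (fun acc r =>
            (PySem.List.pyRange c1 (c2+1) 1).foldl (fun acc2 c => bump acc2 r c 1) acc) m) i j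
          = g2 m i j + (if (a ≤ (i : Int) ∧ (i : Int) < b ∧ c1 ≤ (j : Int) ∧ (j : Int) ≤ c2) then 1 else 0)) := by
  intro k
  induction k with
  | zero =>
    intro a b m hk hrows ha hb
    rw [PySem.List.pyRange_one_eq_nil (show b ≤ a by omega)]
    refine ⟨rfl, hrows, fun i j hi hj => ?_⟩
    rw [if_neg (by omega)]; simp [List.foldl_nil]
  | succ k ih =>
    intro a b m hk hrows ha hb
    have hab : a < b := by omega
    rw [PySem.List.pyRange_one_cons hab, List.foldl_cons]
    obtain ⟨d1, d2, d3⟩ := colFold (w := w) (r := a) ha ((c2+1) - c1).toNat c1 (c2+1) m rfl hrows (by omega) hc1 hc2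
    obtain ⟨l1, l2, l3⟩ := ih (a+1) b _ (by omega) d2 (by omega) (by omega)
    refine ⟨by omega, l2, fun i j hi hj => ?_⟩
    rw [l3 i j (by omega) hj, d3 i j hi hj]
    split_ifs <;> omega

lemma wf_unpack {n : Int} {q : List Int}
    (h : q.length = 4 ∧ 0 ≤ q.getD 0 0 ∧ q.getD 0 0 ≤ q.getD 2 0 ∧ q.getD 2 0 < n ∧
         0 ≤ q.getD 1 0 ∧ q.getD 1 0 ≤ q.getD 3 0 ∧ q.getD 3 0 < n) :
    ∃ r1 c1 r2 c2 : Int, q = [r1, c1, r2, c2] ∧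
      0 ≤ r1 ∧ r1 ≤ r2 ∧ r2 < n ∧ 0 ≤ c1 ∧ c1 ≤ c2 ∧ c2 < n := by
  obtain ⟨r1, c1, r2, c2, rfl⟩ := len4 h.1
  exact ⟨r1, c1, r2, c2, rfl, by simpa [List.getD] using h.2⟩

-- one stepB application adds the covering indicator of the query
lemma g2_stepB {n : Int} {m : List (List Int)} (hlen : m.length = n.toNat)
    (hrows : ∀ row ∈ m, row.length = n.toNat) {q : List Int}
    (hq : ∃ r1 c1 r2 c2 : Int, q = [r1, c1, r2, c2] ∧
      0 ≤ r1 ∧ r1 ≤ r2 ∧ r2 < n ∧ 0 ≤ c1 ∧ c1 ≤ c2 ∧ c2 < n) :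
    (stepB m q).length = n.toNat ∧ (∀ row ∈ stepB m q, row.length = n.toNat) ∧
    ∀ i j : Nat, i < n.toNat → j < n.toNat →
      g2 (stepB m q) i j = g2 m i j + covInd q (i : Int) (j : Int) := by
  obtain ⟨r1, c1, r2, c2, rfl, h1, h2, h3, h4, h5, h6⟩ := hq
  have hn : 0 < n := by omega
  obtain ⟨l1, l2, l3⟩ := rowFold (w := n.toNat) (c1 := c1) (c2 := c2) h4 (by omega)
    ((r2 + 1) - r1).toNat r1 (r2 + 1) m rfl hrows h1 (by omega)
  rw [show stepB m [r1, c1, r2, c2] = (PySem.List.pyRange r1 (r2+1) 1).foldl (fun acc r =>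
        (PySem.List.pyRange c1 (c2+1) 1).foldl (fun acc2 c => bump acc2 r c 1) acc) m from rfl]
  refine ⟨by omega, l2, fun i j hi hj => ?_⟩
  rw [l3 i j (by omega) hj]
  simp only [covInd]
  split_ifs <;> omega

-- B's whole loop adds the covering count
lemma B_entries {n : Int} :
    ∀ (qs : List (List Int)), Pre_rangeAddQueries n qs →
    ∀ (m : List (List Int)), m.length = n.toNat → (∀ row ∈ m, row.length = n.toNat) →
    ((qs.foldl stepB m).length = n.toNat ∧ (∀ row ∈ qs.foldl stepB m, row.length = n.toNat) ∧
     ∀ i j : Nat, i < n.toNat → j < n.toNat →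
       g2 (qs.foldl stepB m) i j = g2 m i j + cnt qs (i : Int) (j : Int)) := by
  intro qs
  induction qs with
  | nil => intro _ m h1 h2; exact ⟨h1, h2, fun i j _ _ => by simp [cnt]⟩
  | cons q qs ih =>
    intro hpre m h1 h2
    have hq := wf_unpack (hpre q (by simp))
    obtain ⟨s1, s2, s3⟩ := g2_stepB h1 h2 hq
    obtain ⟨l1, l2, l3⟩ := ih (fun p hp => hpre p (by simp [hp])) (stepB m q) s1 s2
    refine ⟨l1, l2, fun i j hi hj => ?_⟩
    rw [List.foldl_cons, l3 i j hi hj, s3 i j hi hj]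
    simp [cnt]; ring

-- one stepA application adds the four-corner delta of the query
lemma g2_stepA {n : Int} {m : List (List Int)} (hlen : m.length = (n+1).toNat)
    (hrows : ∀ row ∈ m, row.length = (n+1).toNat) {q : List Int}
    (hq : ∃ r1 c1 r2 c2 : Int, q = [r1, c1, r2, c2] ∧
      0 ≤ r1 ∧ r1 ≤ r2 ∧ r2 < n ∧ 0 ≤ c1 ∧ c1 ≤ c2 ∧ c2 < n) :
    (stepA m q).length = (n+1).toNat ∧ (∀ row ∈ stepA m q, row.length = (n+1).toNat) ∧
    ∀ i j : Nat, i < (n+1).toNat → j < (n+1).toNat →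
      g2 (stepA m q) i j = g2 m i j + dInd q (i : Int) (j : Int) := by
  obtain ⟨r1, c1, r2, c2, rfl, h1, h2, h3, h4, h5, h6⟩ := hq
  have hn : 0 < n := by omega
  have e1 : ((m.length : Int)) = n + 1 := by omega
  have hb1 := rows_bump (c := c1) hrows h1 (by omega) 1
  have hl1 := length_bump m r1 c1 1
  have hb2 := rows_bump (c := c2+1) hb1 h1 (by rw [hl1]; omega) (-1)
  have hl2 := length_bump (bump m r1 c1 1) r1 (c2+1) (-1)
  have hb3 := rows_bump (r := r2+1) (c := c1) hb2 (by omega) (by rw [hl2, hl1]; omega) (-1)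
  have hl3 := length_bump (bump (bump m r1 c1 1) r1 (c2+1) (-1)) (r2+1) c1 (-1)
  have hb4 := rows_bump (r := r2+1) (c := c2+1) hb3 (by omega) (by rw [hl3, hl2, hl1]; omega) 1
  have hl4 := length_bump (bump (bump (bump m r1 c1 1) r1 (c2+1) (-1)) (r2+1) c1 (-1)) (r2+1) (c2+1) 1
  have hstep : stepA m [r1,c1,r2,c2]
      = bump (bump (bump (bump m r1 c1 1) r1 (c2+1) (-1)) (r2+1) c1 (-1)) (r2+1) (c2+1) 1 := rfl
  refine ⟨by rw [hstep, hl4, hl3, hl2, hl1, hlen],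
          by rw [hstep]; exact hb4, fun i j hi hj => ?_⟩
  rw [hstep]
  rw [g2_bump hb3 (by omega) (by rw [hl3, hl2, hl1]; omega) (by omega) (by omega) 1 i j (by omega) hj]
  rw [g2_bump hb2 (by omega) (by rw [hl2, hl1]; omega) h4 (by omega) (-1) i j (by omega) hj]
  rw [g2_bump hb1 h1 (by rw [hl1]; omega) (by omega) (by omega) (-1) i j (by omega) hj]
  rw [g2_bump hrows h1 (by omega) h4 (by omega) 1 i j (by omega) hj]
  simp only [dInd]
  split_ifs <;> omega

-- A's first loop accumulates the difference-array deltas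
lemma grid_entries {n : Int} :
    ∀ (qs : List (List Int)), Pre_rangeAddQueries n qs →
    ∀ (m : List (List Int)), m.length = (n+1).toNat → (∀ row ∈ m, row.length = (n+1).toNat) →
    ((qs.foldl stepA m).length = (n+1).toNat ∧ (∀ row ∈ qs.foldl stepA m, row.length = (n+1).toNat) ∧
     ∀ i j : Nat, i < (n+1).toNat → j < (n+1).toNat →
       g2 (qs.foldl stepA m) i j = g2 m i j + dsum qs (i : Int) (j : Int)) := by
  intro qs
  induction qs with
  | nil => intro _ m h1 h2; exact ⟨h1, h2, fun i j _ _ => by simp [dsum]⟩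
  | cons q qs ih =>
    intro hpre m h1 h2
    have hq := wf_unpack (hpre q (by simp))
    obtain ⟨s1, s2, s3⟩ := g2_stepA h1 h2 hq
    obtain ⟨l1, l2, l3⟩ := ih (fun p hp => hpre p (by simp [hp])) (stepA m q) s1 s2
    refine ⟨l1, l2, fun i j hi hj => ?_⟩
    rw [List.foldl_cons, l3 i j hi hj, s3 i j hi hj]
    simp [dsum]; ring

set_option maxHeartbeats 1000000 in
-- the telescoping identity behind the 2D prefix-sum reconstruction, for one query
lemma key (r1 c1 r2 c2 : Int) (h1 : 0 ≤ r1) (h2 : r1 ≤ r2) (h3 : 0 ≤ c1) (h4 : c1 ≤ c2)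
    (r c : Int) (hr : 0 ≤ r) (hc : 0 ≤ c) :
    covInd [r1,c1,r2,c2] r c
      = dInd [r1,c1,r2,c2] r c
        + (if r = 0 then 0 else covInd [r1,c1,r2,c2] (r-1) c)
        + (if c = 0 then 0 else covInd [r1,c1,r2,c2] r (c-1))
        - (if r = 0 ∨ c = 0 then 0 else covInd [r1,c1,r2,c2] (r-1) (c-1)) := by
  simp only [covInd, dInd]
  split_ifs <;> omega

-- summed over all queries
lemma cnt_rec {n : Int} {qs : List (List Int)} (hpre : Pre_rangeAddQueries n qs)
    {r c : Int} (hr : 0 ≤ r) (hc : 0 ≤ c) :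
    cnt qs r c = dsum qs r c
        + (if r = 0 then 0 else cnt qs (r-1) c)
        + (if c = 0 then 0 else cnt qs r (c-1))
        - (if r = 0 ∨ c = 0 then 0 else cnt qs (r-1) (c-1)) := by
  induction qs with
  | nil => simp [cnt, dsum]
  | cons q qs ih =>
    have hq := wf_unpack (hpre q (by simp))
    obtain ⟨r1, c1, r2, c2, rfl, b1, b2, b3, b4, b5, b6⟩ := hq
    have hk := key r1 c1 r2 c2 b1 b2 b4 b5 r c hr hc
    have hi := ih (fun p hp => hpre p (by simp [hp]))
    simp only [cnt, dsum, List.map_cons, List.sum_cons] at hi ⊢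
    split_ifs at hk hi ⊢ <;> omega

lemma getD_append_lt {α : Type} (l1 l2 : List α) (d : α) (j : Nat) (h : j < l1.length) :
    (l1 ++ l2).getD j d = l1.getD j d := by
  rw [List.getD_eq_getElem _ _ (by simp; omega), List.getD_eq_getElem _ _ h,
      List.getElem_append_left h]

lemma getD_append_len {α : Type} (l1 : List α) (x : α) (d : α) :
    (l1 ++ [x]).getD l1.length d = x := by
  rw [List.getD_eq_getElem _ _ (by simp)]
  simp

lemma getD_snoc {α : Type} (l : List α) (x d : α) (j : Nat) (hj : j = l.length) :
    (l ++ [x]).getD j d = x := by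
  subst hj; exact getD_append_len l x d

lemma g2_zeros (N W i j : Nat) : g2 (List.replicate N (List.replicate W (0:Int))) i j = 0 := by
  unfold g2
  rcases lt_or_ge i N with hi | hi
  · rw [List.getD_eq_getElem (List.replicate N (List.replicate W (0:Int))) [] (by simpa using hi),
        List.getElem_replicate]
    rcases lt_or_ge j W with hj | hj
    · rw [List.getD_eq_getElem _ _ (by simpa using hj), List.getElem_replicate]
    · rw [List.getD_eq_default _ _ (by simpa using hj)]
  · rw [List.getD_eq_default (List.replicate N (List.replicate W (0:Int))) [] (by simpa using hi)]
    simp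

-- rowA with an arbitrary right end of the column loop (rowA grid res n r = rowAcc grid res r n)
def rowAcc (grid res : List (List Int)) (r b : Int) : List Int :=
  (PySem.List.pyRange 0 b 1).foldl (fun row c =>
    let top := if r = 0 then 0 else PySem.List.pyGetD (PySem.List.pyGetD res (r-1) []) c 0
    let left := if c = 0 then 0 else PySem.List.pyGetD row (c-1) 0
    let diag := if r = 0 ∨ c = 0 then 0 else PySem.List.pyGetD (PySem.List.pyGetD res (r-1) []) (c-1) 0
    row ++ [PySem.List.pyGetD (PySem.List.pyGetD grid r []) c 0 + top + left - diag]) []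

lemma rowA_eq (grid res : List (List Int)) (n r : Int) :
    rowA grid res n r = rowAcc grid res r n := rfl


-- res[a][b] read through two pyGetD's is the g2 entry
lemma pyget2_eq_g2 {m : List (List Int)} (r c : Int) (hr : 0 ≤ r) (hrm : r < (m.length : Int))
    (hc : 0 ≤ c) :
    PySem.List.pyGetD (PySem.List.pyGetD m r []) c 0 = g2 m r.toNat c.toNat := by
  have hlt : r.toNat < m.length := by omega
  have hrow : m.getD r.toNat [] = m[r.toNat] := List.getD_eq_getElem _ _ hlt
  rw [PySem.List.pyGetD_eq_getElem m [] hr hrm,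
      show c = ((c.toNat : Nat) : Int) by omega, PySem.List.pyGetD_natCast]
  unfold g2
  rw [hrow, Int.toNat_natCast]

-- one row of A's prefix-sum reconstruction computes the covering counts
lemma rowA_spec {n : Int} {qs grid res : List (List Int)} (hpre : Pre_rangeAddQueries n qs)
    (hn : 0 < n)
    (hglen : grid.length = (n+1).toNat) (hgrows : ∀ row ∈ grid, row.length = (n+1).toNat)
    (hg : ∀ i j : Nat, i < (n+1).toNat → j < (n+1).toNat → g2 grid i j = dsum qs (i:Int) (j:Int))
    {r : Int} (hr : 0 ≤ r) (hrn : r < n)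
    (hreslen : (res.length : Int) = r) (hresrows : ∀ row ∈ res, row.length = n.toNat)
    (hres : ∀ i j : Nat, i < res.length → j < n.toNat → g2 res i j = cnt qs (i:Int) (j:Int)) :
    ∀ k : Nat, k ≤ n.toNat →
      (rowAcc grid res r (k:Int)).length = k ∧
      ∀ j : Nat, j < k → (rowAcc grid res r (k:Int)).getD j 0 = cnt qs r (j:Int) := by
  intro k
  induction k with
  | zero =>
    intro _
    constructor
    · rw [rowAcc, PySem.List.pyRange_one_eq_nil (by omega)]; rfl
    · intro j hj; omega
  | succ k ih =>
    intro hk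
    obtain ⟨ihl, ihe⟩ := ih (by omega)
    have hsplit : rowAcc grid res r ((k+1 : Nat) : Int)
        = (fun row c =>
            let top := if r = 0 then 0 else PySem.List.pyGetD (PySem.List.pyGetD res (r-1) []) c 0
            let left := if c = 0 then 0 else PySem.List.pyGetD row (c-1) 0
            let diag := if r = 0 ∨ c = 0 then 0 else PySem.List.pyGetD (PySem.List.pyGetD res (r-1) []) (c-1) 0
            row ++ [PySem.List.pyGetD (PySem.List.pyGetD grid r []) c 0 + top + left - diag])
          (rowAcc grid res r (k:Int)) (k:Int) := by
      rw [rowAcc, rowAcc, show ((k+1 : Nat) : Int) = (k:Int) + 1 by push_cast; ring,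
          PySem.List.pyRange_one_succ_right (by omega), List.foldl_append, List.foldl_cons,
          List.foldl_nil]
    rw [hsplit]
    simp only []
    -- the value appended at column k
    have hgval : PySem.List.pyGetD (PySem.List.pyGetD grid r []) (k:Int) 0
        = dsum qs r (k:Int) := by
      rw [pyget2_eq_g2 r (k:Int) hr (by omega) (by omega)]
      simp only [Int.toNat_natCast]
      rw [hg r.toNat k (by omega) (by omega), Int.toNat_of_nonneg hr]
    have htop : (if r = 0 then 0 else PySem.List.pyGetD (PySem.List.pyGetD res (r-1) []) (k:Int) 0)
        = (if r = 0 then 0 else cnt qs (r-1) (k:Int)) := by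
      split_ifs with h0
      · rfl
      · rw [pyget2_eq_g2 (r-1) (k:Int) (by omega) (by omega) (by omega)]
        simp only [Int.toNat_natCast]
        rw [hres (r-1).toNat k (by omega) (by omega),
            Int.toNat_of_nonneg (by omega : (0:Int) ≤ r - 1)]
    have hleft : (if (k:Int) = 0 then 0 else PySem.List.pyGetD (rowAcc grid res r (k:Int)) ((k:Int)-1) 0)
        = (if (k:Int) = 0 then 0 else cnt qs r ((k:Int)-1)) := by
      split_ifs with h0
      · rfl
      · rw [show ((k:Int) - 1) = (((k-1 : Nat) : Nat) : Int) by omega, PySem.List.pyGetD_natCast,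
            ihe (k-1) (by omega)]
    have hdiag : (if r = 0 ∨ (k:Int) = 0 then 0 else PySem.List.pyGetD (PySem.List.pyGetD res (r-1) []) ((k:Int)-1) 0)
        = (if r = 0 ∨ (k:Int) = 0 then 0 else cnt qs (r-1) ((k:Int)-1)) := by
      split_ifs with h0
      · rfl
      · rw [pyget2_eq_g2 (r-1) ((k:Int)-1) (by omega) (by omega) (by omega)]
        rw [hres (r-1).toNat ((k:Int)-1).toNat (by omega) (by omega),
            Int.toNat_of_nonneg (by omega : (0:Int) ≤ r - 1),
            Int.toNat_of_nonneg (by omega : (0:Int) ≤ (k:Int) - 1)]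
    rw [hgval, htop, hleft, hdiag]
    constructor
    · simp [ihl]
    · intro j hj
      by_cases hjk : j < k
      · rw [getD_append_lt _ _ _ _ (by omega), ihe j hjk]
      · rw [getD_snoc _ _ _ j (by rw [ihl]; omega),
            show ((j:Nat):Int) = ((k:Nat):Int) by omega,
            cnt_rec hpre hr (by omega : (0:Int) ≤ ((k:Nat):Int))]

-- A's outer row loop builds exactly the covering-count matrix
lemma outer_spec {n : Int} {qs grid : List (List Int)} (hpre : Pre_rangeAddQueries n qs)
    (hn : 0 < n)
    (hglen : grid.length = (n+1).toNat) (hgrows : ∀ row ∈ grid, row.length = (n+1).toNat)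
    (hg : ∀ i j : Nat, i < (n+1).toNat → j < (n+1).toNat → g2 grid i j = dsum qs (i:Int) (j:Int)) :
    ∀ k : Nat, k ≤ n.toNat →
      ((PySem.List.pyRange 0 (k:Int) 1).foldl (fun res r => res ++ [rowA grid res n r]) []).length = k ∧
      (∀ row ∈ (PySem.List.pyRange 0 (k:Int) 1).foldl (fun res r => res ++ [rowA grid res n r]) [], row.length = n.toNat) ∧
      ∀ i j : Nat, i < k → j < n.toNat →
        g2 ((PySem.List.pyRange 0 (k:Int) 1).foldl (fun res r => res ++ [rowA grid res n r]) []) i j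
          = cnt qs (i:Int) (j:Int) := by
  intro k
  induction k with
  | zero =>
    rw [show ((0:Nat):Int) = 0 by rfl, PySem.List.pyRange_one_eq_nil (by omega)]
    exact fun _ => ⟨rfl, by simp, fun i j hi _ => by omega⟩
  | succ k ih =>
    intro hk
    obtain ⟨ihl, ihr, ihe⟩ := ih (by omega)
    have hsplit : (PySem.List.pyRange 0 ((k+1 : Nat) : Int) 1).foldl (fun res r => res ++ [rowA grid res n r]) []
        = ((PySem.List.pyRange 0 (k:Int) 1).foldl (fun res r => res ++ [rowA grid res n r]) [])
          ++ [rowA grid ((PySem.List.pyRange 0 (k:Int) 1).foldl (fun res r => res ++ [rowA grid res n r]) []) n (k:Int)] := by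
      rw [show ((k+1 : Nat) : Int) = (k:Int) + 1 by push_cast; ring,
          PySem.List.pyRange_one_succ_right (by omega), List.foldl_append, List.foldl_cons,
          List.foldl_nil]
    obtain ⟨rl, re⟩ := rowA_spec hpre hn hglen hgrows hg (by omega : (0:Int) ≤ (k:Int)) (by omega)
      (by rw [ihl]) ihr (fun i j hi hj => ihe i j (by omega) hj) n.toNat le_rfl
    rw [show ((n.toNat : Nat) : Int) = n from by omega] at rl re
    have hrowAlen : (rowA grid ((PySem.List.pyRange 0 (k:Int) 1).foldl (fun res r => res ++ [rowA grid res n r]) []) n (k:Int)).length = n.toNat := by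
      rw [rowA_eq]
      exact rl
    refine ⟨?_, ?_, ?_⟩
    · rw [hsplit]; simp [ihl]
    · rw [hsplit]
      intro row hrow
      rcases List.mem_append.mp hrow with h | h
      · exact ihr _ h
      · rw [List.mem_singleton.mp h, hrowAlen]
    · intro i j hi hj
      rw [hsplit]
      by_cases hik : i < k
      · unfold g2
        rw [getD_append_lt _ _ _ _ (by omega)]
        exact ihe i j hik hj
      · unfold g2
        rw [getD_snoc _ _ _ i (by rw [ihl]; omega), rowA_eq,
            show ((i : Nat) : Int) = ((k : Nat) : Int) by omega]
        exact re j hj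

-- two matrices with the same shape and the same entries are equal
lemma mat_ext {a b : List (List Int)} {N W : Nat}
    (hla : a.length = N) (hlb : b.length = N)
    (hwa : ∀ row ∈ a, row.length = W) (hwb : ∀ row ∈ b, row.length = W)
    (h : ∀ i j : Nat, i < N → j < W → g2 a i j = g2 b i j) : a = b := by
  apply List.ext_getElem (by omega)
  intro i h1 h2
  have hwa' : a[i].length = W := hwa _ (List.getElem_mem h1)
  have hwb' : b[i].length = W := hwb _ (List.getElem_mem h2)
  apply List.ext_getElem (by omega)
  intro j hj1 hj2
  have := h i j (by omega) (by omega)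
  rw [g2, g2, List.getD_eq_getElem _ _ h1, List.getD_eq_getElem _ _ h2,
      List.getD_eq_getElem _ _ hj1, List.getD_eq_getElem _ _ hj2] at this
  exact this

-- ===== VERDICT (by name: the statement is the Claim_ definition above) =====
theorem rangeAddQueries_spec : Claim_equal_rangeAddQueries := by
  intro n queries hdom hpre
  unfold Spec_rangeAddQueries
  have hA : rangeAddQueries n queries
      = (PySem.List.pyRange 0 n 1).foldl
          (fun res r => res ++ [rowA (queries.foldl stepA
            (List.replicate (n+1).toNat (List.replicate (n+1).toNat (0:Int)))) res n r]) [] := rfl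
  have hB : rangeAddQueries_alt n queries
      = queries.foldl stepB (List.replicate n.toNat (List.replicate n.toNat (0:Int))) := rfl
  by_cases hn : 0 < n
  · -- grid0 / res0 shapes
    have hz1 : ∀ (N : Nat) (row : List Int), row ∈ List.replicate N (List.replicate N (0:Int)) → row.length = N := by
      intro N row hrow
      rw [List.eq_of_mem_replicate hrow]; simp
    obtain ⟨ga, gb, gc⟩ := grid_entries queries hpre
      (List.replicate (n+1).toNat (List.replicate (n+1).toNat (0:Int))) (by simp) (hz1 _)
    obtain ⟨ba, bb, bc⟩ := B_entries queries hpre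
      (List.replicate n.toNat (List.replicate n.toNat (0:Int))) (by simp) (hz1 _)
    obtain ⟨oa, ob, oc⟩ := outer_spec hpre hn ga gb
      (fun i j hi hj => by rw [gc i j hi hj, g2_zeros]; ring) n.toNat le_rfl
    rw [show ((n.toNat : Nat) : Int) = n from by omega] at oa ob oc
    rw [hA, hB]
    refine mat_ext oa ba ob bb (fun i j hi hj => ?_)
    rw [oc i j hi hj, bc i j hi hj, g2_zeros]
    ring
  · -- n ≤ 0: no well-formed query exists, both results are empty
    have hq : queries = [] := by
      cases queries with
      | nil => rfl
      | cons q qs =>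
        obtain ⟨r1, c1, r2, c2, _, h⟩ := wf_unpack (hpre q (by simp))
        omega
    subst hq
    rw [hA, hB, PySem.List.pyRange_one_eq_nil (by omega)]
    simp [show n.toNat = 0 by omega]
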